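-- pv_equiv track=rewrite | github.com/k13-spec/ratings-tool | app.py | _grade_color
-- ===== SOURCE A (Python) =====
-- _GRADE_COLOUR_MAP = {
--     range(1, 3):   "#1a7a1a",
--     range(3, 5):   "#2e9e2e",
--     range(5, 8):   "#f0c040",
--     range(8, 11):  "#e08020",
--     range(11, 14): "#c04020",
--     range(14, 17): "#a02010",
--     range(17, 21): "#6b0000",
-- }
--
-- def _grade_color(grade) -> str:
--     if grade is None:
--         return "#888888"
--     try:
--         g = int(grade)
--     except Exception:
--         return "#888888"
--     for r, color in _GRADE_COLOUR_MAP.items():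
--         if g in r:
--             return color
--     return "#888888"
-- ===== SOURCE B (Python) =====
-- import bisect
--
-- _BOUNDS = [1, 3, 5, 8, 11, 14, 17, 21]
-- _COLORS = ["#1a7a1a", "#2e9e2e", "#f0c040", "#e08020", "#c04020", "#a02010", "#6b0000"]
--
-- def _grade_color(grade) -> str:
--     if grade is None:
--         return "#888888"
--     try:
--         g = int(grade)
--     except Exception:
--         return "#888888"
--     i = bisect.bisect_right(_BOUNDS, g) - 1
--     if i < 0 or i >= len(_COLORS):
--         return "#888888"
--     return _COLORS[i]
-- ===== Notes on version B (the rewrite author's own statement) =====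
-- stated objective: idiomatic
-- what changed: replaces the linear scan over the range->color dict with a bisect_right binary search over a sorted boundary table plus a parallel color list
import Mathlib
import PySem

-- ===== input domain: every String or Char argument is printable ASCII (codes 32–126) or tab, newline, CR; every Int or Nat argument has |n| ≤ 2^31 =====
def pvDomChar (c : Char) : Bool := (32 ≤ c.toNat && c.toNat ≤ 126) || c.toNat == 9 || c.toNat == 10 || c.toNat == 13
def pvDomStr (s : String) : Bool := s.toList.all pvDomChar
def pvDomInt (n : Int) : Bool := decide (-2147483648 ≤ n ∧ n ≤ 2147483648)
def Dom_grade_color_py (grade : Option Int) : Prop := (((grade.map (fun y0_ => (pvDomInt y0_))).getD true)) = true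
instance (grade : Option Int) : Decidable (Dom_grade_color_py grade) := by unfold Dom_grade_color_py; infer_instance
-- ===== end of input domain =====

-- B replaces A's linear scan over the range->color dict by a bisect_right binary search
-- over a sorted boundary table with a parallel color list (idiomatic; same exact values).


-- ===== PORT A =====
-- _GRADE_COLOUR_MAP in insertion order: ((lo, hi), color) for range(lo, hi)
def gradeColourMap : List ((Int × Int) × String) :=
  [((1, 3),   "#1a7a1a"),
   ((3, 5),   "#2e9e2e"),
   ((5, 8),   "#f0c040"),
   ((8, 11),  "#e08020"),
   ((11, 14), "#c04020"),
   ((14, 17), "#a02010"),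
   ((17, 21), "#6b0000")]

-- the 'for r, color in _GRADE_COLOUR_MAP.items(): if g in r: return color' loop
def gradeScan (g : Int) : List ((Int × Int) × String) → String
  | [] => "#888888"
  | ((lo, hi), color) :: rest =>
      if lo ≤ g ∧ g < hi then color else gradeScan g rest

def grade_color_py (grade : Option Int) : String :=
  match grade with
  | none => "#888888"                       -- grade is None
  | some g => gradeScan g gradeColourMap    -- int(grade) = g never raises on Option Int

-- ===== PORT B =====
def gcBounds : List Int := [1, 3, 5, 8, 11, 14, 17, 21]
def gcColors : List String :=
  ["#1a7a1a", "#2e9e2e", "#f0c040", "#e08020", "#c04020", "#a02010", "#6b0000"]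

def grade_color_py_alt (grade : Option Int) : String :=
  match grade with
  | none => "#888888"
  | some g =>
      let i : Int := (PySem.List.bisectRight gcBounds g : Int) - 1
      if i < 0 ∨ (gcColors.length : Int) ≤ i then "#888888"
      else PySem.List.pyGetD gcColors i "#888888"   -- _COLORS[i], guarded in-range

-- ===== PRECONDITION & SPEC =====
def Spec_grade_color_py (grade : Option Int) (out : String) : Prop := out = grade_color_py_alt grade
instance (grade : Option Int) (out : String) : Decidable (Spec_grade_color_py grade out) := by unfold Spec_grade_color_py; infer_instance

-- ===== CLAIM (what is proved, stated in full; the proofs are below) =====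
def Claim_equal_grade_color_py : Prop := ∀ (grade : Option Int), Dom_grade_color_py grade → Spec_grade_color_py grade (grade_color_py grade)

-- ===== LEMMAS AND PROOFS =====

-- ===== VERDICT (by name: the statement is the Claim_ definition above) =====
set_option maxHeartbeats 1000000 in
theorem grade_color_py_spec : Claim_equal_grade_color_py := by
  intro grade _
  unfold Spec_grade_color_py
  cases grade with
  | none => rfl
  | some g =>
    by_cases h0 : g < 1
    · have hb : PySem.List.bisectRight gcBounds g = 0 := by
        simp [gcBounds, PySem.List.bisectRight, PySem.List.bisectRightLoop]
        split_ifs <;> omega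
      simp [grade_color_py, grade_color_py_alt, gradeScan, gradeColourMap, gcColors, hb,
            PySem.List.pyGetD, PySem.List.pyGet?, PySem.List.pyIdx?]
      all_goals (split_ifs <;> first | rfl | omega)
    by_cases h1 : g < 3
    · have hb : PySem.List.bisectRight gcBounds g = 1 := by
        simp [gcBounds, PySem.List.bisectRight, PySem.List.bisectRightLoop]
        split_ifs <;> omega
      simp [grade_color_py, grade_color_py_alt, gradeScan, gradeColourMap, gcColors, hb,
            PySem.List.pyGetD, PySem.List.pyGet?, PySem.List.pyIdx?]
      all_goals (split_ifs <;> first | rfl | omega)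
    by_cases h2 : g < 5
    · have hb : PySem.List.bisectRight gcBounds g = 2 := by
        simp [gcBounds, PySem.List.bisectRight, PySem.List.bisectRightLoop]
        split_ifs <;> omega
      simp [grade_color_py, grade_color_py_alt, gradeScan, gradeColourMap, gcColors, hb,
            PySem.List.pyGetD, PySem.List.pyGet?, PySem.List.pyIdx?]
      all_goals (split_ifs <;> first | rfl | omega)
    by_cases h3 : g < 8
    · have hb : PySem.List.bisectRight gcBounds g = 3 := by
        simp [gcBounds, PySem.List.bisectRight, PySem.List.bisectRightLoop]
        split_ifs <;> omega
      simp [grade_color_py, grade_color_py_alt, gradeScan, gradeColourMap, gcColors, hb,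
            PySem.List.pyGetD, PySem.List.pyGet?, PySem.List.pyIdx?]
      all_goals (split_ifs <;> first | rfl | omega)
    by_cases h4 : g < 11
    · have hb : PySem.List.bisectRight gcBounds g = 4 := by
        simp [gcBounds, PySem.List.bisectRight, PySem.List.bisectRightLoop]
        split_ifs <;> omega
      simp [grade_color_py, grade_color_py_alt, gradeScan, gradeColourMap, gcColors, hb,
            PySem.List.pyGetD, PySem.List.pyGet?, PySem.List.pyIdx?]
      all_goals (split_ifs <;> first | rfl | omega)
    by_cases h5 : g < 14
    · have hb : PySem.List.bisectRight gcBounds g = 5 := by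
        simp [gcBounds, PySem.List.bisectRight, PySem.List.bisectRightLoop]
        split_ifs <;> omega
      simp [grade_color_py, grade_color_py_alt, gradeScan, gradeColourMap, gcColors, hb,
            PySem.List.pyGetD, PySem.List.pyGet?, PySem.List.pyIdx?]
      all_goals (split_ifs <;> first | rfl | omega)
    by_cases h6 : g < 17
    · have hb : PySem.List.bisectRight gcBounds g = 6 := by
        simp [gcBounds, PySem.List.bisectRight, PySem.List.bisectRightLoop]
        split_ifs <;> omega
      simp [grade_color_py, grade_color_py_alt, gradeScan, gradeColourMap, gcColors, hb,
            PySem.List.pyGetD, PySem.List.pyGet?, PySem.List.pyIdx?]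
      all_goals (split_ifs <;> first | rfl | omega)
    by_cases h7 : g < 21
    · have hb : PySem.List.bisectRight gcBounds g = 7 := by
        simp [gcBounds, PySem.List.bisectRight, PySem.List.bisectRightLoop]
        split_ifs <;> omega
      simp [grade_color_py, grade_color_py_alt, gradeScan, gradeColourMap, gcColors, hb,
            PySem.List.pyGetD, PySem.List.pyGet?, PySem.List.pyIdx?]
      all_goals (split_ifs <;> first | rfl | omega)
    · have hb : PySem.List.bisectRight gcBounds g = 8 := by
        simp [gcBounds, PySem.List.bisectRight, PySem.List.bisectRightLoop]
        split_ifs <;> omega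
      simp [grade_color_py, grade_color_py_alt, gradeScan, gradeColourMap, gcColors, hb,
            PySem.List.pyGetD, PySem.List.pyGet?, PySem.List.pyIdx?]
      all_goals (split_ifs <;> first | rfl | omega)
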